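-- pv_equiv track=rewrite | github.com/cyphou/Tableau-To-PowerBI | powerbi_import/html_template.py | flow_diagram
-- ===== SOURCE A (Python) =====
-- from typing import Any, Dict, List, Optional, Tuple
--
-- def flow_diagram(steps: List[Tuple[str, bool]]) -> str:
--     """Return a horizontal flow diagram.
--
--     Args:
--         steps: list of (label, is_accent) tuples.
--     """
--     html = '<div class="flow-container">\n'
--     for i, (label, accent) in enumerate(steps):
--         if i > 0:
--             html += '<span class="flow-arrow">&#10132;</span>\n'
--         cls = " accent" if accent else ""
--         html += f'<div class="flow-box{cls}">{label}</div>\n'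
--     html += '</div>'
--     return html
-- ===== SOURCE B (Python) =====
-- def flow_diagram(steps):
--     """Return a horizontal flow diagram (recursive head/tail decomposition)."""
--     def box(label, accent):
--         return f'<div class="flow-box{" accent" if accent else ""}">{label}</div>\n'
--
--     def tail(ss):
--         # every step after the first is preceded by an arrow; base case closes the container
--         if not ss:
--             return '</div>'
--         (label, accent) = ss[0]
--         return '<span class="flow-arrow">&#10132;</span>\n' + box(label, accent) + tail(ss[1:])
--
--     if not steps:
--         return '<div class="flow-container">\n</div>'
--     (label, accent) = steps[0]
--     return '<div class="flow-container">\n' + box(label, accent) + tail(steps[1:])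
-- ===== Notes on version B (the rewrite author's own statement) =====
-- stated objective: alternative
-- what changed: A's indexed accumulator loop with an 'if i > 0' arrow branch is replaced by structural head/tail recursion: the first box is a special case, a recursive helper renders arrow+box+rest and carries the closing tag in its base case, so no index or conditional inside the pass remains.
import Mathlib
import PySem

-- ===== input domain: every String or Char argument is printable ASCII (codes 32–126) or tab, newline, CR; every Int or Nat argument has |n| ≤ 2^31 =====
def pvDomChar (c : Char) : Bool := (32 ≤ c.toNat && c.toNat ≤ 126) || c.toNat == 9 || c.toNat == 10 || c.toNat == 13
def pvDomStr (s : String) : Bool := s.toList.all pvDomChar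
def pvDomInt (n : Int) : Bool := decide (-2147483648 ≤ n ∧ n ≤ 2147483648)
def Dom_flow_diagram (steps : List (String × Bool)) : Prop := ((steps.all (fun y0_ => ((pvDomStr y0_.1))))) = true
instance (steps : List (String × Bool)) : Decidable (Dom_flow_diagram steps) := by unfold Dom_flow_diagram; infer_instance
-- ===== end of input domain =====

-- B replaces A's indexed accumulator loop (arrow emitted when i > 0) by structural
-- head/tail recursion: first box special-cased, a helper renders arrow+box+rest.

-- ===== PORT A =====
-- literal transliteration of A: an accumulator string, enumerate, arrow emitted when i > 0
def flow_diagram (steps : List (String × Bool)) : String :=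
  let html : String := "<div class=\"flow-container\">\n"
  let html := (PySem.List.enumerate steps 0).foldl
    (fun html p =>
      let html := if p.1 > 0 then html ++ "<span class=\"flow-arrow\">&#10132;</span>\n" else html
      let cls : String := if p.2.2 then " accent" else ""
      html ++ "<div class=\"flow-box" ++ cls ++ "\">" ++ p.2.1 ++ "</div>\n")
    html
  html ++ "</div>"

-- ===== PORT B =====
-- B's helper box(label, accent)
def pvBox (label : String) (accent : Bool) : String :=
  "<div class=\"flow-box" ++ (if accent then " accent" else "") ++ "\">" ++ label ++ "</div>\n"

-- B's recursive helper tail(ss): arrow + box + rest, base case closes the container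
def pvTail : List (String × Bool) → String
  | [] => "</div>"
  | p :: rest => "<span class=\"flow-arrow\">&#10132;</span>\n" ++ pvBox p.1 p.2 ++ pvTail rest

-- literal transliteration of B: empty case, else opener + first box + tail of the rest
def flow_diagram_alt (steps : List (String × Bool)) : String :=
  match steps with
  | [] => "<div class=\"flow-container\">\n</div>"
  | p :: rest => "<div class=\"flow-container\">\n" ++ pvBox p.1 p.2 ++ pvTail rest

-- ===== PRECONDITION & SPEC =====
def Spec_flow_diagram (steps : List (String × Bool)) (out : String) : Prop := out = flow_diagram_alt steps
instance (steps : List (String × Bool)) (out : String) : Decidable (Spec_flow_diagram steps out) := by unfold Spec_flow_diagram; infer_instance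

-- ===== CLAIM (what is proved, stated in full; the proofs are below) =====
def Claim_equal_flow_diagram : Prop := ∀ (steps : List (String × Bool)), Dom_flow_diagram steps → Spec_flow_diagram steps (flow_diagram steps)

-- ===== LEMMAS AND PROOFS =====

-- A's loop over the tail (every index ≥ 1, so the arrow branch always fires),
-- followed by the closing tag, equals the accumulator plus B's pvTail
theorem pv_foldA (xs : List (String × Bool)) : ∀ (n : Int), 1 ≤ n → ∀ (h : String),
    ((PySem.List.enumerate xs n).foldl
      (fun html p =>
        (if p.1 > 0 then html ++ "<span class=\"flow-arrow\">&#10132;</span>\n" else html)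
          ++ "<div class=\"flow-box" ++ (if p.2.2 then " accent" else "")
          ++ "\">" ++ p.2.1 ++ "</div>\n") h).toList ++ "</div>".toList
    = h.toList ++ (pvTail xs).toList := by
  induction xs with
  | nil => intro n _ h; simp [PySem.List.enumerate_nil, pvTail]
  | cons x xs ih =>
    intro n hn h
    rw [PySem.List.enumerate_cons, List.foldl_cons]
    have hpos : n > 0 := by omega
    simp only [hpos, if_pos]
    rw [ih (n + 1) (by omega)]
    simp [pvTail, pvBox, List.append_assoc]

theorem pv_equal (steps : List (String × Bool)) : flow_diagram steps = flow_diagram_alt steps := by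
  apply String.toList_inj.mp
  cases steps with
  | nil =>
    simp [flow_diagram, flow_diagram_alt, PySem.List.enumerate_nil]
  | cons x xs =>
    simp only [flow_diagram, flow_diagram_alt]
    rw [PySem.List.enumerate_cons, List.foldl_cons]
    simp only [String.toList_append]
    rw [pv_foldA xs (0 + 1) (by norm_num) _]
    simp [pvBox, List.append_assoc]

-- ===== VERDICT (by name: the statement is the Claim_ definition above) =====
theorem flow_diagram_spec : Claim_equal_flow_diagram := by
  intro steps _
  exact pv_equal steps
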